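/-
  SEGMENT F4 OF `start_decoder` (0x115494 – 0x1155c2: the class loops 3990 / 3997 of the floor section; 69 instructions, 6 contract
  calls (get_bits ×4, error ×2), 6 check sites, 5 stores into the floor element, two nested loops) SPLIT AT THE TWO LOOP HEADS AND
  AT TWO RETURNS OF get_bits: the assertions at the four new cut points, the claims of the five children, and the composition
  `SegF4.of_parts` (pure logic: `ReachVia.trans`, two nested `ReachVia.loop`; no machine step).

      .F4a  0x115494                                   `mov r12d,[rsp+24H]` (j = 0, the literal-0 slot Z24)
                                                       exit: AtClassHead 0 (loop19 = cut207 = 0x115499)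
      .F4b  0x115499 – 0x1154cd                        `cmp r12d,r13d ; jg` — taken (`max_class < j`): AtF5 (the parent's exit);
                                                       else `get_bits(f,3)`, `class_dimensions[j] = eax + 1` (checked byte store
                                                       0x1154c0), `get_bits(f,2)` — exit at its return: ClassMid j (cut209 = 0x1154d2)
      .F4c  0x1154d2 – 0x1154e9 + 0x11555e – 0x1155a7  `class_subclasses[j] = eax` (checked byte store 0x1154df); `!= 0`:
                                                       `get_bits(f,8)`, `class_masterbooks[j]` (checked byte store 0x115578), the
                                                       range test against `codebook_count` (checked load 0x11558d; failing:
                                                       `error(f, 20)`, `jmp 113b22`: AtERR); then `mov r14d,[rsp+24H]` (k = 0)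
                                                       exits: AtBookHead j 0 (loop20 = cut210 = 0x1154ee), AtERR
      .F4d  0x1154ee – 0x11550e + 0x1155be – 0x1155c2  `1 << class_subclasses[j] <= k`: `++j`, exit AtClassHead (j+1); else
                                                       `get_bits(f,8)` — exit at its return: BookMid j k (cut211 = 0x115513)
      .F4e  0x115513 – 0x11555c + 0x1155ac – 0x1155b9  `subclass_books[j][k] = (int16)(eax − 1)` (spilled to `[rsp+30H]`, checked word
                                                       store 0x115539), the SIGNED range test against `codebook_count` (checked load
                                                       0x11554f; failing: `error(f, 20)`, `jmp 113b22`: AtERR); `++k`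
                                                       exits: AtBookHead j (k+1), AtERR

  WHAT IS LIVE AT THE CUTS (read off c/vorbis_f.dis 115494 … 1155c7). Everywhere: rsp (= R), rbp (= f: `mov rdi,rbp`, `[rbp+0a0H]`),
  rbx (= g(i): every element access is `[rbx + …]`), r13d (= max_class: `cmp r12d,r13d`), r12d (= j). Callee-saved, so they survive
  the calls. Additionally
      loop19 (0x115499)   nothing else. r14 r15 dead (r14 := 0x1154b3, r15 := 0x1154af before any use).
      cut209 (0x1154d2)   eax (get_bits(f,2): `mov r15d,eax`; < 4), r14 (= (int64) j from `movsxd r14,r12d` 0x1154b3; read 0x1154d5, 0x11556e).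
      loop20 (0x1154ee)   r14d (= k; set 0x1154e9 from Z24, `add r14d,1` 0x115558; read 0x1154fd, 0x11551b). r15 dead (:= 0x115521).
      cut211 (0x115513)   eax (get_bits(f,8): `sub eax,1`; < 256), r14d (= k).
  The spill slot `[rsp+30H]` is written 0x115516 and read 0x115534 inside .F4e only. The literal-0 slot `[rsp+24H]` (Z24 of
  `Mid.consts`) is read 0x115494 (.F4a) and 0x1154e9 (.F4c).
-/
import Vorbis.Spec.StartDecoderFloor

namespace Vorbis.Spec.StartDecoder
open X86 X86.User Asan

/-! ### The assertions at the cut points inside segment F4 -/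

/-- **Inside segment F4**: `BodyF4` with the program counter as a parameter — what every cut point of the segment asserts: the floor
loop's invariant (`FloorLoop`), `rbx = g(i)`, `r13d = max_class`, and FL3(i), FL4(i), FL5(i) of the floor under construction. -/
structure In4 (u₀ : State) (g : Ghost) (i : Nat) (A5 : Arena) (A : Arena × List Obj) (mc : Int) (pc : Word) (v : State) :
    Prop where
  /-- the invariant of loop 3966 at this program counter (rsp = R, rbp = f, `Frame`, `Mid g 5 5 6`, the finished floors) -/
  loop : FloorLoop u₀ g pc i A5 A v
  /-- rbx = g = floor_config + 1596·i (set in F2; callee-saved; every element access of the segment is `[rbx + …]`) -/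
  rbx : v.reg .rbx = addr (floorAt g v.mem i)
  /-- r13d = max_class (−1 when there is no partition; set in F2; read by `cmp r12d,r13d` 0x115499) -/
  r13 : v.reg .r13 = word32 mc
  /-- FL3(i), FL4(i), FL5(i), `−1 ≤ max_class ≤ 15` (the segment writes nothing that these read: its stores go to `[g+21H, g+152H)`) -/
  cur : Floor4 g v.mem i mc

/-- The entry assertion of the segment is `In4` at its first address. -/
theorem In4.of_body {u₀ : State} {g : Ghost} {i : Nat} {A5 : Arena} {A : Arena × List Obj} {mc : Int} {v : State}
    (h : BodyF4 u₀ g i A5 A mc v) : In4 u₀ g i A5 A mc pc_F4 v :=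
  ⟨h.loop, h.rbx, h.r13, h.cur⟩

/-- **The class `j` under construction inside the subclass-book loop 3997**: the three bytes stored before the loop satisfy FL6's
first three clauses, the books below `k` its fourth. With `2 ^ class_subclasses[j] ≤ k` it is `ClassOK` (`ClassOK.of_books`). -/
structure ClassCur (mem : Mem) (gf : Nat) (cbc : Int) (j k : Nat) : Prop where
  /-- `class_dimensions[j] = get_bits(f,3) + 1` (store 0x1154c0) -/
  dim : 1 ≤ Floor1.class_dimensions mem gf j ∧ Floor1.class_dimensions mem gf j ≤ 8
  /-- `class_subclasses[j] = get_bits(f,2)` (store 0x1154df) -/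
  sub : Floor1.class_subclasses mem gf j ≤ 3
  /-- `class_masterbooks[j] < codebook_count` when there are subclasses (store 0x115578, test 0x11558d) -/
  master : Floor1.class_subclasses mem gf j ≠ 0 → (Floor1.class_masterbooks mem gf j : Int) < cbc
  /-- `subclass_books[j][0 .. k)` are −1 or a codebook index (store 0x115539, test 0x11554f) -/
  books : BooksUpTo mem gf cbc j k
  /-- the counter has not passed the bound (so `k ≤ 8`) -/
  k_le : k ≤ 2 ^ Floor1.class_subclasses mem gf j

/-- **The head of loop 3990** (`loop19` = `cut207` = 0x115499, `cmp r12d,r13d`; from .F4a with `j = 0`, from .F4d with `j + 1`): `r12d = j`,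
`j ≤ max_class + 1`, FL6 for the classes below `j`. Measure of the loop: `max_class + 1 − j`. Dead: r14 r15, `[R+30H]`. -/
structure AtClassHead (u₀ : State) (g : Ghost) (i : Nat) (A5 : Arena) (A : Arena × List Obj) (mc : Int) (j : Nat) (v : State) :
    Prop where
  /-- the segment's common part at `loop19` -/
  in4 : In4 u₀ g i A5 A mc Vorbis.L.start_decoder.loop19 v
  /-- r12d = j (0x115494 from Z24; `add r12d,1` 0x1155be; read 0x115499, 0x1154b3, 0x1154ee, 0x11551e) -/
  r12 : v.reg .r12 = addr j
  /-- `j ≤ max_class + 1` (so `j ≤ 16`) -/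
  j_le : (j : Int) ≤ mc + 1
  /-- FL6 for every class below `j` -/
  classes : ClassesUpTo v.mem (floorAt g v.mem i) (stb_vorbis.codebook_count v.mem g.f) j

/-- **The return of `get_bits(f, 2)`** (`cut209` = 0x1154d2, `mov r15d,eax`; from .F4b): `j ≤ max_class` (`jg` 0x11549c not taken),
`class_dimensions[j]` stored, `r14 = j` sign-extended, eax = the two bits. Dead: r15. -/
structure ClassMid (u₀ : State) (g : Ghost) (i : Nat) (A5 : Arena) (A : Arena × List Obj) (mc : Int) (j : Nat) (v : State) :
    Prop where
  /-- the segment's common part at `cut209` -/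
  in4 : In4 u₀ g i A5 A mc Vorbis.L.start_decoder.cut209 v
  /-- r12d = j -/
  r12 : v.reg .r12 = addr j
  /-- r14 = (int64) j (`movsxd r14,r12d` 0x1154b3; read by `lea rdi,[rbx+r14+31H]` 0x1154d5, `[rbx+r14+41H]` 0x11556e) -/
  r14 : v.reg .r14 = addr j
  /-- `j ≤ max_class` (so `j ≤ 15`: the row `j` of the class tables lies inside them) -/
  j_le : (j : Int) ≤ mc
  /-- FL6 for every class below `j` (the store 0x1154c0 went into row `j`) -/
  classes : ClassesUpTo v.mem (floorAt g v.mem i) (stb_vorbis.codebook_count v.mem g.f) j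
  /-- `class_dimensions[j] = get_bits(f,3) + 1 ∈ [1, 8]` (store 0x1154c0; read by `ClassCur.dim`) -/
  dim : 1 ≤ Floor1.class_dimensions v.mem (floorAt g v.mem i) j ∧ Floor1.class_dimensions v.mem (floorAt g v.mem i) j ≤ 8
  /-- the result of `get_bits(f, 2)` (the FULL register: `GetBitsResult 2`; read by `mov r15d,eax` 0x1154d2) -/
  rax : (v.reg .rax).toNat < 4

/-- **The head of loop 3997** (`loop20` = `cut210` = 0x1154ee, `movsxd rax,r12d`; from .F4c with `k = 0`, from .F4e with `k + 1`):
as the class head with `j ≤ max_class`, `r14d = k`, and the class `j` under construction. Measure: `2 ^ class_subclasses[j] − k`.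
Dead: r15, `[R+30H]`. -/
structure AtBookHead (u₀ : State) (g : Ghost) (i : Nat) (A5 : Arena) (A : Arena × List Obj) (mc : Int) (j k : Nat) (v : State) :
    Prop where
  /-- the segment's common part at `loop20` -/
  in4 : In4 u₀ g i A5 A mc Vorbis.L.start_decoder.loop20 v
  /-- r12d = j -/
  r12 : v.reg .r12 = addr j
  /-- r14d = k (0x1154e9 from Z24; `add r14d,1` 0x115558; read 0x1154fd, 0x11551b) -/
  r14 : v.reg .r14 = addr k
  /-- `j ≤ max_class` -/
  j_le : (j : Int) ≤ mc
  /-- FL6 for every class below `j` -/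
  classes : ClassesUpTo v.mem (floorAt g v.mem i) (stb_vorbis.codebook_count v.mem g.f) j
  /-- the class `j` under construction: its three bytes, the books below `k`, `k ≤ 2 ^ class_subclasses[j]` -/
  cur : ClassCur v.mem (floorAt g v.mem i) (stb_vorbis.codebook_count v.mem g.f) j k

/-- **The return of `get_bits(f, 8)` inside loop 3997** (`cut211` = 0x115513, `sub eax,1`; from .F4d): the facts of the book head with
`k < 2 ^ class_subclasses[j]` (`jle` 0x115500 not taken) and eax = the eight bits. Dead: r15, `[R+30H]`. -/
structure BookMid (u₀ : State) (g : Ghost) (i : Nat) (A5 : Arena) (A : Arena × List Obj) (mc : Int) (j k : Nat) (v : State) :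
    Prop where
  /-- the segment's common part at `cut211` -/
  in4 : In4 u₀ g i A5 A mc Vorbis.L.start_decoder.cut211 v
  /-- r12d = j -/
  r12 : v.reg .r12 = addr j
  /-- r14d = k -/
  r14 : v.reg .r14 = addr k
  /-- `j ≤ max_class` -/
  j_le : (j : Int) ≤ mc
  /-- FL6 for every class below `j` -/
  classes : ClassesUpTo v.mem (floorAt g v.mem i) (stb_vorbis.codebook_count v.mem g.f) j
  /-- the class `j` under construction -/
  cur : ClassCur v.mem (floorAt g v.mem i) (stb_vorbis.codebook_count v.mem g.f) j k
  /-- the loop test: `k < 1 << class_subclasses[j]` (so the store `subclass_books[j][k]` stays in row `j`: `k ≤ 7`) -/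
  k_lt : k < 2 ^ Floor1.class_subclasses v.mem (floorAt g v.mem i) j
  /-- the result of `get_bits(f, 8)` (the FULL register; read by `sub eax,1` 0x115513) -/
  rax : (v.reg .rax).toNat < 256

/-! ### The claims of the five children -/

/-- Segment F4a (0x115494): `j = 0`. Exit: the class head with `j = 0` (`ClassesUpTo.zero`). -/
def SegF4a (Lay : Layout) (μ : Microarch) (u₀ : State) : Prop :=
  ∀ (g : Ghost) (i : Nat) (A5 : Arena) (A : Arena × List Obj) (mc : Int) (v : State),
    BodyF4 u₀ g i A5 A mc v → ReachVia Lay μ WayInv v (fun w => AtClassHead u₀ g i A5 A mc 0 w)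

/-- Segment F4b (0x115499 – 0x1154cd): the loop test of 3990 (`max_class < j`: `AtF5`, the parent's exit, with the class counter
`n = j`), `get_bits(f,3)`, the checked store of `class_dimensions[j]`, `get_bits(f,2)`; exit at its return. -/
def SegF4b (Lay : Layout) (μ : Microarch) (u₀ : State) : Prop :=
  ∀ (g : Ghost) (i : Nat) (A5 : Arena) (A : Arena × List Obj) (mc : Int) (j : Nat) (v : State),
    AtClassHead u₀ g i A5 A mc j v →
      ReachVia Lay μ WayInv v (fun w => AtF5 u₀ g i w ∨ ClassMid u₀ g i A5 A mc j w)

/-- Segment F4c (0x1154d2 – 0x1154e9, 0x11555e – 0x1155a7): the checked store of `class_subclasses[j]`; with subclasses: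
`get_bits(f,8)`, the checked store of `class_masterbooks[j]`, its range test (failing: `error`, the epilogue); `k = 0`. -/
def SegF4c (Lay : Layout) (μ : Microarch) (u₀ : State) : Prop :=
  ∀ (g : Ghost) (i : Nat) (A5 : Arena) (A : Arena × List Obj) (mc : Int) (j : Nat) (v : State),
    ClassMid u₀ g i A5 A mc j v →
      ReachVia Lay μ WayInv v (fun w => AtBookHead u₀ g i A5 A mc j 0 w ∨ AtERR u₀ g w)

/-- Segment F4d (0x1154ee – 0x11550e, 0x1155be – 0x1155c2): the loop test of 3997; at its exit class `j` is complete
(`ClassOK.of_books`), `++j`, back to the class head; else `get_bits(f,8)`, exit at its return. -/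
def SegF4d (Lay : Layout) (μ : Microarch) (u₀ : State) : Prop :=
  ∀ (g : Ghost) (i : Nat) (A5 : Arena) (A : Arena × List Obj) (mc : Int) (j k : Nat) (v : State),
    AtBookHead u₀ g i A5 A mc j k v →
      ReachVia Lay μ WayInv v (fun w => BookMid u₀ g i A5 A mc j k w ∨ AtClassHead u₀ g i A5 A mc (j + 1) w)

/-- Segment F4e (0x115513 – 0x11555c, 0x1155ac – 0x1155b9): the checked store of `subclass_books[j][k]`, its signed range test
(failing: `error`, the epilogue), `++k`, back to the book head. -/
def SegF4e (Lay : Layout) (μ : Microarch) (u₀ : State) : Prop :=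
  ∀ (g : Ghost) (i : Nat) (A5 : Arena) (A : Arena × List Obj) (mc : Int) (j k : Nat) (v : State),
    BookMid u₀ g i A5 A mc j k v →
      ReachVia Lay μ WayInv v (fun w => AtBookHead u₀ g i A5 A mc j (k + 1) w ∨ AtERR u₀ g w)

/-! ### The composition -/

namespace F4

/-- The measure of loop 3990 as a function of the state: `17 − j`, `j` read from r12 (`j ≤ max_class + 1 ≤ 16` at every head). -/
def classMeasure (v : State) : Nat := 17 - (v.reg .r12).toNat

/-- The measure of loop 3997 as a function of the state: `9 − k`, `k` read from r14 (`k ≤ 2 ^ class_subclasses[j] ≤ 8` at every head). -/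
def bookMeasure (v : State) : Nat := 9 - (v.reg .r14).toNat

/-- The class counter of a class head is at most 16. -/
theorem class_j_le {u₀ : State} {g : Ghost} {i : Nat} {A5 : Arena} {A : Arena × List Obj} {mc : Int} {j : Nat} {v : State}
    (h : AtClassHead u₀ g i A5 A mc j v) : j ≤ 16 := by
  have h1 := h.j_le
  have h2 := h.in4.cur.mc_hi
  omega

/-- The measure of a class head. -/
theorem classMeasure_eq {u₀ : State} {g : Ghost} {i : Nat} {A5 : Arena} {A : Arena × List Obj} {mc : Int} {j : Nat} {v : State}
    (h : AtClassHead u₀ g i A5 A mc j v) : classMeasure v = 17 - j := by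
  have hj := class_j_le h
  unfold classMeasure
  rw [h.r12, toNat_addr _ (by omega)]

/-- The book counter of a book head is at most 8. -/
theorem book_k_le {u₀ : State} {g : Ghost} {i : Nat} {A5 : Arena} {A : Arena × List Obj} {mc : Int} {j k : Nat} {v : State}
    (h : AtBookHead u₀ g i A5 A mc j k v) : k ≤ 8 := by
  have h1 := h.cur.k_le
  have h2 := two_pow_le_8 _ h.cur.sub
  omega

/-- The measure of a book head. -/
theorem bookMeasure_eq {u₀ : State} {g : Ghost} {i : Nat} {A5 : Arena} {A : Arena × List Obj} {mc : Int} {j k : Nat} {v : State}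
    (h : AtBookHead u₀ g i A5 A mc j k v) : bookMeasure v = 9 - k := by
  have hk := book_k_le h
  unfold bookMeasure
  rw [h.r14, toNat_addr _ (by omega)]

/-- **The class under construction over the stores of a piece** whose part of the element starts at or above `subclass_books[j][k]`
(`[G + 52H + 16j + 2k, …)`: the store of .F4e, or no store at all with the empty part `[1596, 1596)`): everything `ClassCur … j k` reads
(the three bytes of row `j`, the books below `k`) lies below it. -/
theorem classCur_carry {g : Ghost} {A : Arena × List Obj} {mem mem' : Mem} {i lo hi : Nat} {ws : List Span} {cbc : Int} {j k : Nat}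
    (geo : Floor.Geo g A mem i) (hc : ClassCur mem (floorAt g mem i) cbc j k) (hj : j ≤ 15)
    (hlo : 0x52 + 16 * j + 2 * k ≤ lo) (hlh : lo ≤ hi) (hhi : hi ≤ 1596)
    (hs : Mem.SameExcept ws mem mem') (hw : ∀ w, w ∈ ws → Floor.WinT g i (floorAt g mem i) lo hi w) :
    ClassCur mem' (floorAt g mem i) cbc j k := by
  have EG := Floor.elem_below geo hs hw hlh hhi
  obtain ⟨r8, rlo, rhi, ra, flo, fhi, fstack, farena, flog, fc1, fc64, ilt, gdef, blo, bhi, btext, bstack, bdata, blog⟩ := geo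
  have ed : Floor1.class_dimensions mem' (floorAt g mem i) j = Floor1.class_dimensions mem (floorAt g mem i) j := by
    simp only [vacc, voff]
    exact EG.u8 _ (by omega) (by omega) (by omega)
  have es : Floor1.class_subclasses mem' (floorAt g mem i) j = Floor1.class_subclasses mem (floorAt g mem i) j := by
    simp only [vacc, voff]
    exact EG.u8 _ (by omega) (by omega) (by omega)
  have em : Floor1.class_masterbooks mem' (floorAt g mem i) j = Floor1.class_masterbooks mem (floorAt g mem i) j := by
    simp only [vacc, voff]
    exact EG.u8 _ (by omega) (by omega) (by omega)
  refine ⟨?_, ?_, ?_, ?_, ?_⟩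
  · rw [ed]
    exact hc.dim
  · rw [es]
    exact hc.sub
  · rw [es, em]
    exact hc.master
  · intro k' hk'
    have eb : Floor1.subclass_books mem' (floorAt g mem i) j k' = Floor1.subclass_books mem (floorAt g mem i) j k' := by
      simp only [vacc, voff]
      exact EG.i16 _ (by omega) (by omega) (by omega)
    rw [eb]
    exact hc.books k' hk'
  · rw [es]
    exact hc.k_le

/-- **Loop 3997 from its head**, from the two children that make one round (.F4d: head → the return of `get_bits(f,8)` ∨ the next
class head; .F4e: that return → the next book head ∨ the epilogue): the run ends at the next class head or at the epilogue.
`ReachVia.loop` with the measure `9 − k`. -/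
theorem book_loop {Lay : Layout} {μ : Microarch} {u₀ : State} (hd : SegF4d Lay μ u₀) (he : SegF4e Lay μ u₀)
    (g : Ghost) (i : Nat) (A5 : Arena) (A : Arena × List Obj) (mc : Int) (j : Nat) :
    ∀ v, (∃ k, AtBookHead u₀ g i A5 A mc j k v) →
      ReachVia Lay μ WayInv v (fun w => AtClassHead u₀ g i A5 A mc (j + 1) w ∨ AtERR u₀ g w) := by
  refine ReachVia.loop bookMeasure ?_
  intro v hv
  obtain ⟨k, hk⟩ := hv
  refine (hd g i A5 A mc j k v hk).trans ?_
  intro w hw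
  rcases hw with hmid | hhead
  · -- the return of `get_bits(f, 8)`: one more book
    refine (he g i A5 A mc j k w hmid).trans ?_
    intro w' hw'
    rcases hw' with hnext | herr
    · refine ReachVia.done (Or.inr ⟨⟨k + 1, hnext⟩, ?_⟩)
      have hk8 := book_k_le hnext
      rw [bookMeasure_eq hnext, bookMeasure_eq hk]
      omega
    · exact ReachVia.done (Or.inl (Or.inr herr))
  · -- the loop is left: class `j` is complete
    exact ReachVia.done (Or.inl (Or.inl hhead))

end F4

/-- **THE COMPOSITION of the split of segment F4**: .F4a reaches the class head with `j = 0`; loop 3990 by `ReachVia.loop` with the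
measure `17 − j` (one round = .F4b, .F4c, then loop 3997 = `F4.book_loop` over .F4d, .F4e); the exits are the parent's: `AtF5` (from
.F4b) and `AtERR` (from .F4c, .F4e). Pure logic: no machine step. -/
theorem SegF4.of_parts {Lay : Layout} {μ : Microarch} {u₀ : State}
    (ha : SegF4a Lay μ u₀) (hb : SegF4b Lay μ u₀) (hc : SegF4c Lay μ u₀) (hd : SegF4d Lay μ u₀) (he : SegF4e Lay μ u₀) :
    SegF4 Lay μ u₀ := by
  intro g i v hv
  obtain ⟨A5, A, mc, hbody⟩ := hv
  refine (ha g i A5 A mc v hbody).trans ?_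
  intro v0 h0
  -- loop 3990: the invariant is the class head for some `j`
  have hloop : ∀ w, (∃ j, AtClassHead u₀ g i A5 A mc j w) →
      ReachVia Lay μ WayInv w (fun w' => AtF5 u₀ g i w' ∨ AtERR u₀ g w') := by
    refine ReachVia.loop F4.classMeasure ?_
    intro w hw
    obtain ⟨j, hj⟩ := hw
    refine (hb g i A5 A mc j w hj).trans ?_
    intro w1 h1
    rcases h1 with h5 | hmid
    · exact ReachVia.done (Or.inl (Or.inl h5))
    · refine (hc g i A5 A mc j w1 hmid).trans ?_
      intro w2 h2
      rcases h2 with hbook | herr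
      · refine (F4.book_loop hd he g i A5 A mc j w2 ⟨0, hbook⟩).mono ?_
        intro w3 h3
        rcases h3 with hnext | herr
        · refine Or.inr ⟨⟨j + 1, hnext⟩, ?_⟩
          have hj16 := F4.class_j_le hnext
          rw [F4.classMeasure_eq hnext, F4.classMeasure_eq hj]
          omega
        · exact Or.inl (Or.inr herr)
      · exact ReachVia.done (Or.inl (Or.inr herr))
  exact hloop v0 ⟨0, h0⟩

end Vorbis.Spec.StartDecoder
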